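-- pv_equiv track=rewrite | github.com/afnanenayet/daily-coding-problem | src/577.py | word_circle
-- ===== SOURCE A (Python) =====
-- from typing import List, Deque, Tuple, Dict
-- from collections import defaultdict, deque
-- from enum import Enum
--
-- class DFSState(Enum):
--     WHITE = 0
--     GREY = 1
--     BLACK = 2
--
-- def word_circle(words: List[str]) -> bool:
--     """We can resolve this by doing a breath-first-search
--     """
--     # A dictionary of all letters that begin with a particular letter
--     first_letters: Dict[str, List[str]] = defaultdict(list)
--
--     # Initialize the first and last letter lookup tables
--     for word in words:
--         first_letters[word[0]].append(word)
--
--     seen: Dict[str, DFSState] = dict()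
--
--     for word in words:
--         seen[word] = DFSState.WHITE
--
--     def has_cycle(node: str) -> bool:
--         """Use a DFS to detect a cycle
--
--         param init: The node to start the search from
--         returns: Whether there is a cycle in the graph
--         """
--         if seen[node] != DFSState.WHITE:
--             return True
--         seen[node] = DFSState.GREY
--         last_letter = node[-1]
--
--         for neighbor in first_letters[last_letter]:
--             if seen[neighbor] != DFSState.BLACK and has_cycle(neighbor):
--                 return True
--         seen[node] = DFSState.BLACK
--         return False
--
--     for word in words:
--         if seen[word] == DFSState.WHITE and has_cycle(word):
--             return True
--     return False
-- ===== SOURCE B (Python) =====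
-- def word_circle(words):
--     """Collapse each word to a (first-letter, last-letter) edge, saturate the
--     reachability relation of that small letter graph to a fixpoint; a cycle in
--     the word-chaining graph exists iff some letter reaches itself."""
--     pairs = {(w[0], w[-1]) for w in words}
--     succ = {}
--     for a, b in pairs:
--         succ.setdefault(a, set()).add(b)
--     letters = {c for p in pairs for c in p}
--     reach = set(pairs)
--     for _ in range(len(letters) * len(letters)):
--         new = reach | {(a, d) for (a, b) in reach for d in succ.get(b, ())}
--         if new == reach:
--             break
--         reach = new
--     return any(a == b for (a, b) in reach)
-- ===== Notes on version B (the rewrite author's own statement) =====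
-- stated objective: faster
-- what changed: A runs a recursive three-colour DFS over the word graph (every word a node, neighbours looked up by first letter); B collapses each word to a (first-letter,last-letter) edge of a small letter graph and saturates that relation to its transitive-closure fixpoint, answering whether some letter reaches itself.
import Mathlib
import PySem

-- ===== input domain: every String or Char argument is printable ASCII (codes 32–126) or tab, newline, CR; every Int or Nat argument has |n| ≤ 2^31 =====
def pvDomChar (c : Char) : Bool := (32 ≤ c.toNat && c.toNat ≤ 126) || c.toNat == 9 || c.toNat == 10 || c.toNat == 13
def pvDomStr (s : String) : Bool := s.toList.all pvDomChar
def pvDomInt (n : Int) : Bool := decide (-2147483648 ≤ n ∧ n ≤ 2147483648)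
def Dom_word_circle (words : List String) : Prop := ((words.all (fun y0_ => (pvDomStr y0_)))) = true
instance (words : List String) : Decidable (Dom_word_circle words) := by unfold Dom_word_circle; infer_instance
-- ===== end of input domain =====

-- B replaces A's recursive three-colour DFS over the n-node word graph by saturating the
-- reachability relation of the collapsed (first-letter → last-letter) graph, whose size is
-- bounded by the alphabet; same result, different and measurably faster algorithm.

-- ===== PORT A =====

inductive DFSSt
  | white
  | grey
  | black
deriving DecidableEq, Repr

-- word[0] / word[-1]; Python raises IndexError on "" (excluded by Pre_), default unused there
def pvFirst (w : String) : Char := w.toList.headD '?'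
def pvLast (w : String) : Char := w.toList.getLastD '?'

-- first_letters: Dict key is the one-character string word[0], modelled by its Char
def pvFirstLetters (words : List String) : PySem.Dict Char (List String) :=
  words.foldl (fun d w => d.modify (pvFirst w) [] (fun l => l ++ [w])) PySem.Dict.empty

-- the 'for neighbor in first_letters[last_letter]' loop of has_cycle, with early return
def neighLoopF (hc : String → PySem.Dict String DFSSt → Bool × PySem.Dict String DFSSt) :
    List String → PySem.Dict String DFSSt → Bool × PySem.Dict String DFSSt
  | [], s => (false, s)
  | v :: rest, s =>
    if PySem.Dict.getD s v DFSSt.white ≠ DFSSt.black then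
      match hc v s with
      | (true, s') => (true, s')
      | (false, s') => neighLoopF hc rest s'
    else neighLoopF hc rest s

-- has_cycle; seen[node] is PySem.Dict.getD (the key is always present); fuel bounds the
-- recursion depth and is proved never to run out (fuel_ge lemmas below)
def hasCycle (fl : PySem.Dict Char (List String)) :
    Nat → String → PySem.Dict String DFSSt → Bool × PySem.Dict String DFSSt
  | 0, _, s => (true, s)
  | f + 1, node, s =>
    if PySem.Dict.getD s node DFSSt.white ≠ DFSSt.white then (true, s)
    else
      match neighLoopF (fun v t => hasCycle fl f v t) (PySem.Dict.getD fl (pvLast node) [])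
          (PySem.Dict.insert s node DFSSt.grey) with
      | (true, s2) => (true, s2)
      | (false, s2) => (false, PySem.Dict.insert s2 node DFSSt.black)

-- the final 'for word in words' loop
def topLoop (fl : PySem.Dict Char (List String)) (f : Nat) :
    List String → PySem.Dict String DFSSt → Bool
  | [], _ => false
  | w :: rest, s =>
    if PySem.Dict.getD s w DFSSt.white = DFSSt.white then
      match hasCycle fl f w s with
      | (true, _) => true
      | (false, s') => topLoop fl f rest s'
    else topLoop fl f rest s

def word_circle (words : List String) : Bool :=
  let fl := pvFirstLetters words
  let seen0 := words.foldl (fun d w => PySem.Dict.insert d w DFSSt.white) PySem.Dict.empty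
  topLoop fl (words.length + 2) words seen0

-- ===== PORT B =====

-- pairs = {(w[0], w[-1]) for w in words}
def pvPairs (words : List String) : PySem.Set (Char × Char) :=
  PySem.Set.ofList (words.map (fun w => (pvFirst w, pvLast w)))

-- succ.setdefault(a, set()).add(b)
def pvSucc (pairs : List (Char × Char)) : PySem.Dict Char (PySem.Set Char) :=
  pairs.foldl (fun d p => d.modify p.1 [] (fun s => PySem.Set.add s p.2)) PySem.Dict.empty

-- new = reach | {(a, d) for (a, b) in reach for d in succ.get(b, ())}
def pvCompose (succ : PySem.Dict Char (PySem.Set Char)) (reach : PySem.Set (Char × Char)) :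
    PySem.Set (Char × Char) :=
  reach.foldl (fun acc p => (PySem.Dict.getD succ p.2 []).foldl
    (fun acc2 d => PySem.Set.add acc2 (p.1, d)) acc) reach

-- the bounded saturation loop with its break
def pvSat (succ : PySem.Dict Char (PySem.Set Char)) :
    Nat → PySem.Set (Char × Char) → PySem.Set (Char × Char)
  | 0, reach => reach
  | k + 1, reach =>
    let nw := pvCompose succ reach
    if PySem.Set.equal nw reach then reach else pvSat succ k nw

def word_circle_alt (words : List String) : Bool :=
  let pairs := pvPairs words
  let succ := pvSucc pairs
  let letters : PySem.Set Char := PySem.Set.ofList (pairs.flatMap (fun p => [p.1, p.2]))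
  let reach := pvSat succ (letters.length * letters.length) pairs
  reach.any (fun p => p.1 == p.2)

-- ===== PRECONDITION & SPEC =====

-- Python A evaluates word[0] and word[-1]: an empty word raises IndexError (B raises there too)
def Pre_word_circle (words : List String) : Prop := ∀ w ∈ words, w ≠ ""
instance (words : List String) : Decidable (Pre_word_circle words) := by
  unfold Pre_word_circle; infer_instance

def pvWitness_word_circle : List String := ["ab", "ba", "cd"]

def Spec_word_circle (words : List String) (out : Bool) : Prop := out = word_circle_alt words
instance (words : List String) (out : Bool) : Decidable (Spec_word_circle words out) := by
  unfold Spec_word_circle; infer_instance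

-- ===== CLAIM (what is proved, stated in full; the proofs are below) =====
def Claim_equal_word_circle : Prop := ∀ (words : List String), Dom_word_circle words →
  Pre_word_circle words → Spec_word_circle words (word_circle words)

-- ===== LEMMAS AND PROOFS =====

-- the word-chaining edge relation of A's graph
def WE (words : List String) (u v : String) : Prop := v ∈ words ∧ pvFirst v = pvLast u
-- the collapsed letter relation of B's graph
def LEdge (words : List String) (a b : Char) : Prop := ∃ w ∈ words, pvFirst w = a ∧ pvLast w = b

-- ---- B side: the saturation loop computes exactly the transitive closure of LEdge ----

theorem mem_pvPairs (words : List String) (a b : Char) :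
    (a, b) ∈ pvPairs words ↔ LEdge words a b := by
  unfold pvPairs LEdge
  rw [PySem.Set.mem_ofList, List.mem_map]
  constructor
  · rintro ⟨w, hw, heq⟩
    cases heq
    exact ⟨w, hw, rfl, rfl⟩
  · rintro ⟨w, hw, h1, h2⟩
    exact ⟨w, hw, by rw [h1, h2]⟩

theorem mem_pvSucc (pairs : List (Char × Char)) (c d : Char) :
    d ∈ PySem.Dict.getD (pvSucc pairs) c [] ↔ (c, d) ∈ pairs := by
  have gen : ∀ (l : List (Char × Char)) (dict : PySem.Dict Char (PySem.Set Char)),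
      d ∈ PySem.Dict.getD (l.foldl (fun d' p => d'.modify p.1 [] (fun s => PySem.Set.add s p.2)) dict) c []
        ↔ d ∈ PySem.Dict.getD dict c [] ∨ (c, d) ∈ l := by
    intro l
    induction l with
    | nil => simp
    | cons p t ih =>
      intro dict
      simp only [List.foldl_cons, ih, PySem.Dict.getD_modify, List.mem_cons]
      by_cases hc : c = p.1
      · subst hc
        simp [PySem.Set.mem_add, Prod.ext_iff]
        tauto
      · rw [if_neg hc]
        constructor
        · rintro (h | h); · exact Or.inl h
          · exact Or.inr (Or.inr h)
        · rintro (h | (h | h)); · exact Or.inl h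
          · exact absurd (congrArg Prod.fst h) hc
          · exact Or.inr h
  simpa [pvSucc] using gen pairs PySem.Dict.empty

theorem mem_pvCompose (succ : PySem.Dict Char (PySem.Set Char)) (reach : PySem.Set (Char × Char))
    (x : Char × Char) :
    x ∈ pvCompose succ reach ↔ x ∈ reach ∨
      ∃ p ∈ reach, ∃ d ∈ PySem.Dict.getD succ p.2 [], x = (p.1, d) := by
  have gen : ∀ (l : List (Char × Char)) (acc : PySem.Set (Char × Char)),
      x ∈ l.foldl (fun acc p => (PySem.Dict.getD succ p.2 []).foldl
          (fun acc2 d => PySem.Set.add acc2 (p.1, d)) acc) acc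
        ↔ x ∈ acc ∨ ∃ p ∈ l, ∃ d ∈ PySem.Dict.getD succ p.2 [], x = (p.1, d) := by
    intro l
    induction l with
    | nil => simp
    | cons p t ih =>
      intro acc
      rw [List.foldl_cons, ih, PySem.Set.mem_foldl_add]
      simp only [List.mem_cons]
      constructor
      · rintro (⟨h | ⟨dd, hd, hx⟩⟩ | ⟨q, hq, dd, hd, hx⟩)
        · exact Or.inl h
        · exact Or.inr ⟨p, Or.inl rfl, dd, hd, hx⟩
        · exact Or.inr ⟨q, Or.inr hq, dd, hd, hx⟩
      · rintro (h | ⟨q, hq | hq, dd, hd, hx⟩)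
        · exact Or.inl (Or.inl h)
        · subst hq; exact Or.inl (Or.inr ⟨dd, hd, hx⟩)
        · exact Or.inr ⟨q, hq, dd, hd, hx⟩
  exact gen reach reach

theorem nodup_pvCompose (succ : PySem.Dict Char (PySem.Set Char)) (reach : PySem.Set (Char × Char))
    (h : reach.Nodup) : (pvCompose succ reach).Nodup := by
  have gen : ∀ (l : List (Char × Char)) (acc : PySem.Set (Char × Char)), acc.Nodup →
      (l.foldl (fun acc p => (PySem.Dict.getD succ p.2 []).foldl
          (fun acc2 d => PySem.Set.add acc2 (p.1, d)) acc) acc).Nodup := by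
    intro l
    induction l with
    | nil => intro acc h; exact h
    | cons p t ih =>
      intro acc hacc
      rw [List.foldl_cons, ← PySem.Set.update_map_eq_foldl_add]
      exact ih _ (PySem.Set.nodup_update _ _ hacc)
  exact gen reach reach h

theorem reach_sub_pvCompose (succ : PySem.Dict Char (PySem.Set Char))
    (reach : PySem.Set (Char × Char)) (x : Char × Char) (h : x ∈ reach) :
    x ∈ pvCompose succ reach := (mem_pvCompose succ reach x).2 (Or.inl h)

def pvLetters (words : List String) : PySem.Set Char :=
  PySem.Set.ofList ((pvPairs words).flatMap (fun p => [p.1, p.2]))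

theorem mem_pvLetters (words : List String) (c : Char) :
    c ∈ pvLetters words ↔ ∃ p ∈ pvPairs words, c = p.1 ∨ c = p.2 := by
  simp [pvLetters, PySem.Set.mem_ofList, List.mem_flatMap]

def ClosedR (words : List String) (R : List (Char × Char)) : Prop :=
  ∀ a b c, (a, b) ∈ R → (b, c) ∈ pvPairs words → (a, c) ∈ R

theorem pvSat_spec (words : List String) : ∀ (fuel : Nat) (R : PySem.Set (Char × Char)),
    R.Nodup → (∀ x ∈ pvPairs words, x ∈ R) →
    (∀ x ∈ R, x.1 ∈ pvLetters words ∧ x.2 ∈ pvLetters words) →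
    (∀ x ∈ R, Relation.TransGen (LEdge words) x.1 x.2) →
    (pvLetters words).length * (pvLetters words).length ≤ fuel + R.length →
    (∀ x ∈ pvPairs words, x ∈ pvSat (pvSucc (pvPairs words)) fuel R) ∧
    ClosedR words (pvSat (pvSucc (pvPairs words)) fuel R) ∧
    (∀ x ∈ pvSat (pvSucc (pvPairs words)) fuel R, Relation.TransGen (LEdge words) x.1 x.2) := by
  intro fuel
  induction fuel with
  | zero =>
    intro R hnd hpairs hlet htc hfuel
    refine ⟨by simpa [pvSat] using hpairs, ?_, by simpa [pvSat] using htc⟩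
    -- fuel 0 forces R to be all of letters × letters, which is closed
    have hcard : R.toFinset = (pvLetters words).toFinset ×ˢ (pvLetters words).toFinset := by
      apply Finset.eq_of_subset_of_card_le
      · intro x hx
        rw [List.mem_toFinset] at hx
        rcases hlet x hx with ⟨ha, hb⟩
        simp [Finset.mem_product, List.mem_toFinset, ha, hb]
      · calc ((pvLetters words).toFinset ×ˢ (pvLetters words).toFinset).card
            = (pvLetters words).toFinset.card * (pvLetters words).toFinset.card := Finset.card_product _ _
          _ ≤ (pvLetters words).length * (pvLetters words).length :=
              Nat.mul_le_mul (List.toFinset_card_le _) (List.toFinset_card_le _)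
          _ ≤ 0 + R.length := hfuel
          _ = R.toFinset.card := by rw [Nat.zero_add, List.toFinset_card_of_nodup hnd]
    intro a b c hab hbc
    have ha : a ∈ pvLetters words := (hlet (a, b) hab).1
    have hc : c ∈ pvLetters words := by
      rw [mem_pvLetters]; exact ⟨(b, c), hbc, Or.inr rfl⟩
    have : (a, c) ∈ R.toFinset := by
      rw [hcard]; simp [Finset.mem_product, List.mem_toFinset, ha, hc]
    simpa [pvSat, List.mem_toFinset] using this
  | succ k ih =>
    intro R hnd hpairs hlet htc hfuel
    show _ ∧ _ ∧ _
    rw [pvSat]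
    by_cases heq : PySem.Set.equal (pvCompose (pvSucc (pvPairs words)) R) R = true
    · rw [if_pos heq]
      have hiff := (PySem.Set.equal_iff _ _).1 heq
      refine ⟨hpairs, ?_, htc⟩
      intro a b c hab hbc
      apply (hiff (a, c)).1
      rw [mem_pvCompose]
      exact Or.inr ⟨(a, b), hab, c, (mem_pvSucc _ _ _).2 hbc, rfl⟩
    · rw [if_neg heq]
      set nw := pvCompose (pvSucc (pvPairs words)) R with hnw
      have hsubnw : ∀ x ∈ R, x ∈ nw := reach_sub_pvCompose _ _
      have hndnw : nw.Nodup := nodup_pvCompose _ _ hnd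
      have hmemnw := mem_pvCompose (pvSucc (pvPairs words)) R
      -- every new element keeps the invariants
      have hletnw : ∀ x ∈ nw, x.1 ∈ pvLetters words ∧ x.2 ∈ pvLetters words := by
        intro x hx
        rcases (hmemnw x).1 hx with h | ⟨p, hp, d, hd, hxd⟩
        · exact hlet x h
        · subst hxd
          refine ⟨(hlet p hp).1, ?_⟩
        
          rw [mem_pvLetters]
          exact ⟨(p.2, d), (mem_pvSucc _ _ _).1 hd, Or.inr rfl⟩
      have htcnw : ∀ x ∈ nw, Relation.TransGen (LEdge words) x.1 x.2 := by
        intro x hx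
        rcases (hmemnw x).1 hx with h | ⟨p, hp, d, hd, hxd⟩
        · exact htc x h
        · subst hxd
          exact (htc p hp).tail ((mem_pvPairs words _ _).1 ((mem_pvSucc _ _ _).1 hd))
      -- not equal and a superset: nw is strictly longer
      have hlt : R.length < nw.length := by
        rw [PySem.Set.equal_iff] at heq
        rw [not_forall] at heq
        rcases heq with ⟨x, hx⟩
        have hxnw : x ∈ nw ∧ x ∉ R := by
          by_cases hxR : x ∈ R
          · exact absurd (iff_of_true (hsubnw x hxR) hxR) hx
          · refine ⟨?_, hxR⟩
            by_contra hxn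
            exact hx (iff_of_false hxn hxR)
        have : R.toFinset ⊂ nw.toFinset := by
          constructor
          · intro y hy; rw [List.mem_toFinset] at *; exact hsubnw y hy
          · intro hcon
            exact hxnw.2 (by simpa [List.mem_toFinset] using hcon (by simpa [List.mem_toFinset] using hxnw.1))
        have := Finset.card_lt_card this
        rwa [List.toFinset_card_of_nodup hnd, List.toFinset_card_of_nodup hndnw] at this
      exact ih nw hndnw (fun x hx => hsubnw x (hpairs x hx)) hletnw htcnw (by omega)

theorem word_circle_alt_eq_cycle (words : List String) :
    word_circle_alt words = true ↔ ∃ a, Relation.TransGen (LEdge words) a a := by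
  have hpl : ∀ x ∈ pvPairs words, x.1 ∈ pvLetters words ∧ x.2 ∈ pvLetters words := by
    intro x hx
    constructor
    · rw [mem_pvLetters]; exact ⟨x, hx, Or.inl rfl⟩
    · rw [mem_pvLetters]; exact ⟨x, hx, Or.inr rfl⟩
  have hspec := pvSat_spec words ((pvLetters words).length * (pvLetters words).length)
    (pvPairs words) (PySem.Set.nodup_ofList _) (fun x hx => hx) hpl
    (fun x hx => Relation.TransGen.single ((mem_pvPairs words x.1 x.2).1 (by simpa using hx)))
    (by omega)
  rcases hspec with ⟨hsub, hclosed, htc⟩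
  have hreach : ∀ a b, Relation.TransGen (LEdge words) a b →
      (a, b) ∈ pvSat (pvSucc (pvPairs words)) ((pvLetters words).length * (pvLetters words).length) (pvPairs words) := by
    intro a b h
    induction h with
    | single h => exact hsub _ ((mem_pvPairs words _ _).2 h)
    | tail h1 h2 ih => exact hclosed _ _ _ ih ((mem_pvPairs words _ _).2 h2)
  unfold word_circle_alt
  show (pvSat _ _ _).any _ = true ↔ _
  rw [List.any_eq_true]
  constructor
  · rintro ⟨p, hp, hpe⟩
    have := htc p hp
    exact ⟨p.1, by rwa [(by simpa using hpe : p.1 = p.2)] at this ⊢⟩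
  · rintro ⟨a, ha⟩
    exact ⟨(a, a), hreach a a ha, by simp⟩

-- ---- bridge: word-graph cycles and letter-graph cycles coincide ----

theorem cycle_bridge (words : List String) :
    (∃ u, Relation.TransGen (WE words) u u) ↔ ∃ a, Relation.TransGen (LEdge words) a a := by
  constructor
  · rintro ⟨u, hu⟩
    have gen : ∀ x y, Relation.TransGen (WE words) x y →
        Relation.TransGen (LEdge words) (pvLast x) (pvLast y) := by
      intro x y h
      induction h with
      | single h => exact .single ⟨_, h.1, h.2, rfl⟩
      | tail _ h2 ih => exact ih.tail ⟨_, h2.1, h2.2, rfl⟩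
    exact ⟨pvLast u, gen u u hu⟩
  · rintro ⟨a, ha⟩
    have gen : ∀ x y, Relation.TransGen (LEdge words) x y →
        ∃ u v, u ∈ words ∧ v ∈ words ∧ pvFirst u = x ∧ pvLast v = y ∧
          (u = v ∨ Relation.TransGen (WE words) u v) := by
      intro x y h
      induction h with
      | single h =>
        rcases h with ⟨w, hw, h1, h2⟩
        exact ⟨w, w, hw, hw, h1, h2, Or.inl rfl⟩
      | tail _ h2 ih =>
        rcases ih with ⟨u, v, hu, hv, hfu, hlv, huv⟩
        rcases h2 with ⟨w, hw, hfw, hlw⟩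
        have hedge : WE words v w := ⟨hw, hfw.trans hlv.symm⟩
        refine ⟨u, w, hu, hw, hfu, hlw, Or.inr ?_⟩
        rcases huv with rfl | htg
        · exact .single hedge
        · exact htg.tail hedge
    rcases gen a a ha with ⟨u, v, hu, hv, hfu, hlv, huv⟩
    have hedge : WE words v u := ⟨hu, hfu.trans hlv.symm⟩
    rcases huv with rfl | htg
    · exact ⟨u, .single hedge⟩
    · exact ⟨u, htg.tail hedge⟩

-- ---- A side: the three-colour DFS detects exactly the existence of a word-graph cycle ----

def colS (s : PySem.Dict String DFSSt) (w : String) : DFSSt := PySem.Dict.getD s w DFSSt.white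

def rkS : DFSSt → Nat
  | .white => 0
  | .grey => 1
  | .black => 2

def MonoS (s s' : PySem.Dict String DFSSt) : Prop := ∀ w, rkS (colS s w) ≤ rkS (colS s' w)

def wcnt (words : List String) (s : PySem.Dict String DFSSt) : Nat :=
  (PySem.List.dedup words).countP (fun w => colS s w == DFSSt.white)

def InvA (words : List String) (s : PySem.Dict String DFSSt) : Prop :=
  (∀ u v, colS s u = DFSSt.black → WE words u v → colS s v = DFSSt.black) ∧
  (∀ u, colS s u = DFSSt.black → ¬ Relation.TransGen (WE words) u u)

theorem colS_insert (s : PySem.Dict String DFSSt) (u w : String) (x : DFSSt) :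
    colS (PySem.Dict.insert s u x) w = if w = u then x else colS s w := by
  simp [colS, PySem.Dict.getD_insert]

theorem monoS_refl (s : PySem.Dict String DFSSt) : MonoS s s := fun _ => le_refl _

theorem monoS_trans {s t u : PySem.Dict String DFSSt} (h1 : MonoS s t) (h2 : MonoS t u) :
    MonoS s u := fun w => (h1 w).trans (h2 w)

theorem black_persist {s s' : PySem.Dict String DFSSt} (h : MonoS s s') {w : String}
    (hb : colS s w = DFSSt.black) : colS s' w = DFSSt.black := by
  have := h w
  rw [hb] at this
  cases hcol : colS s' w <;> rw [hcol] at this <;> simp [rkS] at this ⊢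

theorem white_back {s s' : PySem.Dict String DFSSt} (h : MonoS s s') {w : String}
    (hw : colS s' w = DFSSt.white) : colS s w = DFSSt.white := by
  have := h w
  rw [hw] at this
  cases hcol : colS s w <;> rw [hcol] at this <;> simp [rkS] at this ⊢

theorem wcnt_mono (words : List String) {s s' : PySem.Dict String DFSSt} (h : MonoS s s') :
    wcnt words s' ≤ wcnt words s := by
  apply List.countP_mono_left
  intro w _ hw
  rw [beq_iff_eq] at hw ⊢
  exact white_back h hw

theorem countP_lt_flip {α : Type} (l : List α) (p q : α → Bool) (u : α) (hu : u ∈ l)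
    (hq : q u = false) (hp : p u = true) (himp : ∀ w, q w = true → p w = true) :
    l.countP q < l.countP p := by
  induction l with
  | nil => cases hu
  | cons a t ih =>
    rw [List.countP_cons, List.countP_cons]
    have hle : t.countP q ≤ t.countP p := List.countP_mono_left (fun w _ h => himp w h)
    rcases List.mem_cons.1 hu with rfl | hmem
    · simp [hq, hp]; omega
    · have hlt := ih hmem
      by_cases hqa : q a = true
      · rw [hqa, himp a hqa]; omega
      · rw [Bool.not_eq_true] at hqa
        rw [hqa]
        by_cases hpa : p a = true <;> simp [hpa] <;> omega

theorem wcnt_grey (words : List String) (s : PySem.Dict String DFSSt) (node : String)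
    (hn : node ∈ words) (hwcol : colS s node = DFSSt.white) :
    wcnt words (PySem.Dict.insert s node DFSSt.grey) < wcnt words s := by
  unfold wcnt
  have hmem : node ∈ PySem.List.dedup words := by
    rw [PySem.List.dedup_eq_ofList, PySem.Set.mem_ofList]; exact hn
  apply countP_lt_flip _ _ _ node hmem
  · simp [colS_insert]
  · simp [hwcol]
  · intro w hw
    rw [beq_iff_eq] at hw ⊢
    rcases eq_or_ne w node with rfl | hne
    · rw [colS_insert, if_pos rfl] at hw; cases hw
    · rwa [colS_insert, if_neg hne] at hw

theorem mem_firstLetters (words : List String) (c : Char) (v : String) :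
    v ∈ PySem.Dict.getD (pvFirstLetters words) c [] ↔ v ∈ words ∧ pvFirst v = c := by
  have gen : ∀ (l : List String) (dict : PySem.Dict Char (List String)),
      v ∈ PySem.Dict.getD (l.foldl (fun d w => d.modify (pvFirst w) [] (fun ws => ws ++ [w])) dict) c []
        ↔ v ∈ PySem.Dict.getD dict c [] ∨ (v ∈ l ∧ pvFirst v = c) := by
    intro l
    induction l with
    | nil => simp
    | cons w t ih =>
      intro dict
      rw [List.foldl_cons, ih, PySem.Dict.getD_modify]
      by_cases hc : c = pvFirst w
      · subst hc
        rw [if_pos rfl]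
        simp only [List.mem_append, List.mem_cons, List.not_mem_nil, or_false]
        constructor
        · rintro ((h | rfl) | ⟨hm, he⟩)
          · exact Or.inl h
          · exact Or.inr ⟨Or.inl rfl, rfl⟩
          · exact Or.inr ⟨Or.inr hm, he⟩
        · rintro (h | ⟨rfl | hm, he⟩)
          · exact Or.inl (Or.inl h)
          · exact Or.inl (Or.inr rfl)
          · exact Or.inr ⟨hm, he⟩
      · rw [if_neg hc]
        simp only [List.mem_cons]
        constructor
        · rintro (h | ⟨hm, he⟩)
          · exact Or.inl h
          · exact Or.inr ⟨Or.inr hm, he⟩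
        · rintro (h | ⟨rfl | hm, he⟩)
          · exact Or.inl h
          · exact absurd he.symm hc
          · exact Or.inr ⟨hm, he⟩
  simpa [pvFirstLetters] using gen words PySem.Dict.empty

def HCok (words : List String) (f : Nat) : Prop :=
  ∀ node s, InvA words s →
    (∀ w, colS s w = DFSSt.grey → Relation.TransGen (WE words) w node) →
    node ∈ words → 2 + wcnt words s ≤ f → colS s node ≠ DFSSt.black →
    ((hasCycle (pvFirstLetters words) f node s).1 = true →
      ∃ u, Relation.TransGen (WE words) u u) ∧
    ((hasCycle (pvFirstLetters words) f node s).1 = false →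
      colS (hasCycle (pvFirstLetters words) f node s).2 node = DFSSt.black ∧
      InvA words (hasCycle (pvFirstLetters words) f node s).2 ∧
      (∀ w, colS (hasCycle (pvFirstLetters words) f node s).2 w = DFSSt.grey ↔
        colS s w = DFSSt.grey) ∧
      MonoS s (hasCycle (pvFirstLetters words) f node s).2)

theorem nl_spec (words : List String) (f : Nat) (hHC : HCok words f) (node : String) :
    ∀ (vs : List String) (s : PySem.Dict String DFSSt), InvA words s →
    (∀ v ∈ vs, WE words node v) → node ∈ words → colS s node = DFSSt.grey →
    (∀ w, colS s w = DFSSt.grey → w = node ∨ Relation.TransGen (WE words) w node) →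
    2 + wcnt words s ≤ f →
    ((neighLoopF (fun v t => hasCycle (pvFirstLetters words) f v t) vs s).1 = true →
      ∃ u, Relation.TransGen (WE words) u u) ∧
    ((neighLoopF (fun v t => hasCycle (pvFirstLetters words) f v t) vs s).1 = false →
      (∀ v ∈ vs, colS (neighLoopF (fun v t => hasCycle (pvFirstLetters words) f v t) vs s).2 v = DFSSt.black) ∧
      InvA words (neighLoopF (fun v t => hasCycle (pvFirstLetters words) f v t) vs s).2 ∧
      (∀ w, colS (neighLoopF (fun v t => hasCycle (pvFirstLetters words) f v t) vs s).2 w = DFSSt.grey ↔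
        colS s w = DFSSt.grey) ∧
      MonoS s (neighLoopF (fun v t => hasCycle (pvFirstLetters words) f v t) vs s).2) := by
  intro vs
  induction vs with
  | nil =>
    intro s hInv _ _ _ _ _
    refine ⟨by simp [neighLoopF], ?_⟩
    intro _
    exact ⟨by simp, hInv, fun w => Iff.rfl, monoS_refl s⟩
  | cons v rest ih =>
    intro s hInv hvs hnode hgreyN hgrey hfuel
    have hWEv : WE words node v := hvs v (List.mem_cons_self)
    by_cases hvb : colS s v = DFSSt.black
    · -- neighbour already black: skipped
      have hcond : ¬ (PySem.Dict.getD s v DFSSt.white ≠ DFSSt.black) := by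
        simpa [colS] using hvb
      rw [neighLoopF, if_neg hcond]
      have hrest := ih s hInv (fun x hx => hvs x (List.mem_cons_of_mem _ hx)) hnode hgreyN hgrey hfuel
      refine ⟨hrest.1, ?_⟩
      intro hfalse
      rcases hrest.2 hfalse with ⟨hbl, hInv', hgr', hmono'⟩
      refine ⟨?_, hInv', hgr', hmono'⟩
      intro x hx
      rcases List.mem_cons.1 hx with rfl | hx'
      · exact black_persist hmono' hvb
      · exact hbl x hx'
    · have hcond : (PySem.Dict.getD s v DFSSt.white ≠ DFSSt.black) := by
        simpa [colS] using hvb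
      rw [neighLoopF, if_pos hcond]
      have hhc := hHC v s hInv
        (by
          intro w hw
          rcases hgrey w hw with rfl | htg
          · exact .single hWEv
          · exact htg.tail hWEv)
        hWEv.1 hfuel hvb
      rcases hr : hasCycle (pvFirstLetters words) f v s with ⟨b, s2⟩
      rw [hr] at hhc
      try rw [hr]
      cases b with
      | true =>
        refine ⟨fun _ => hhc.1 rfl, ?_⟩
        intro hfalse
        simp at hfalse
      | false =>
        rcases hhc.2 rfl with ⟨hvbl, hInv2, hgr2, hmono2⟩
        dsimp only at hvbl hInv2 hgr2 hmono2 ⊢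
        have hrest := ih s2 hInv2 (fun x hx => hvs x (List.mem_cons_of_mem _ hx)) hnode
          ((hgr2 node).2 hgreyN)
          (fun w hw => hgrey w ((hgr2 w).1 hw))
          (by have h2 := wcnt_mono words hmono2; omega)
        refine ⟨hrest.1, ?_⟩
        intro hfalse
        rcases hrest.2 hfalse with ⟨hbl, hInv', hgr', hmono'⟩
        refine ⟨?_, hInv', fun w => (hgr' w).trans (hgr2 w), monoS_trans hmono2 hmono'⟩
        intro x hx
        rcases List.mem_cons.1 hx with rfl | hx'
        · exact black_persist hmono' hvbl
        · exact hbl x hx'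

theorem hc_spec (words : List String) : ∀ f, HCok words f := by
  intro f
  induction f with
  | zero =>
    intro node s _ _ _ hfuel _
    omega
  | succ f ih =>
    intro node s hInv hgrey hnode hfuel hnb
    by_cases hw : colS s node = DFSSt.white
    · have hcond : ¬ (PySem.Dict.getD s node DFSSt.white ≠ DFSSt.white) := by
        simpa [colS] using hw
      rw [hasCycle, if_neg hcond]
      set s1 := PySem.Dict.insert s node DFSSt.grey with hs1
      have hcol1 : ∀ w, colS s1 w = if w = node then DFSSt.grey else colS s w :=
        fun w => colS_insert s node w DFSSt.grey
      have hInv1 : InvA words s1 := by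
        constructor
        · intro u v hu huv
          rw [hcol1] at hu
          split at hu
          · cases hu
          · rw [hcol1]
            have hv := hInv.1 u v hu huv
            split
            · next hveq => rw [hveq] at hv; rw [hv] at hw; cases hw
            · exact hv
        · intro u hu
          rw [hcol1] at hu
          split at hu
          · cases hu
          · exact hInv.2 u hu
      have hg1 : colS s1 node = DFSSt.grey := by rw [hcol1, if_pos rfl]
      have hnl := nl_spec words f ih node (PySem.Dict.getD (pvFirstLetters words) (pvLast node) []) s1
        hInv1
        (fun v hv => by
          rcases (mem_firstLetters words (pvLast node) v).1 hv with ⟨h1, h2⟩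
          exact ⟨h1, h2⟩)
        hnode hg1
        (fun w hwg => by
          rw [hcol1] at hwg
          split at hwg
          · next h => exact Or.inl h
          · exact Or.inr (hgrey w hwg))
        (by
          have hwg : wcnt words s1 < wcnt words s := by
            rw [hs1]; exact wcnt_grey words s node hnode hw
          omega)
      rcases hr : neighLoopF (fun v t => hasCycle (pvFirstLetters words) f v t)
          (PySem.Dict.getD (pvFirstLetters words) (pvLast node) []) s1 with ⟨b, s2⟩
      rw [hs1] at hr
      rw [hr] at hnl
      try rw [hr]
      cases b with
      | true => exact ⟨fun _ => hnl.1 rfl, fun hfalse => by simp at hfalse⟩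
      | false =>
        rcases hnl.2 rfl with ⟨hbl, hInv2, hgr2, hmono2⟩
        dsimp only at hbl hInv2 hgr2 hmono2 ⊢
        set s3 := PySem.Dict.insert s2 node DFSSt.black with hs3
        have hcol3 : ∀ w, colS s3 w = if w = node then DFSSt.black else colS s2 w :=
          fun w => colS_insert s2 node w DFSSt.black
        constructor
        · intro htrue
          simp at htrue
        · intro _
          refine ⟨by rw [hcol3, if_pos rfl], ?_, ?_, ?_⟩
          · -- InvA s3
            constructor
            · intro u v hu huv
              rw [hcol3] at hu ⊢
              split
              · rfl
              · next hvne =>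
                split at hu
                · next hueq =>
                  rw [hueq] at huv
                  have hvmem : v ∈ PySem.Dict.getD (pvFirstLetters words) (pvLast node) [] :=
                    (mem_firstLetters words (pvLast node) v).2 ⟨huv.1, huv.2⟩
                  exact hbl v hvmem
                · exact hInv2.1 u v hu huv
            · intro u hu
              rw [hcol3] at hu
              split at hu
              · next hueq =>
                rw [hueq]
                intro hcyc
                rcases (Relation.TransGen.head'_iff).1 hcyc with ⟨v, hWEv, hrt⟩
                have hvmem : v ∈ PySem.Dict.getD (pvFirstLetters words) (pvLast node) [] :=
                  (mem_firstLetters words (pvLast node) v).2 ⟨hWEv.1, hWEv.2⟩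
                have hvbl : colS s2 v = DFSSt.black := hbl v hvmem
                rcases Relation.ReflTransGen.cases_head hrt with heq | ⟨c, hvc, hct⟩
                · -- v = node: node black in s2 but grey in s2
                  rw [heq] at hvbl
                  have hgn : colS s2 node = DFSSt.grey := (hgr2 node).2 hg1
                  rw [hvbl] at hgn; cases hgn
                · -- TransGen v node, so a cycle through the black v
                  have htg : Relation.TransGen (WE words) v node := Relation.TransGen.head' hvc hct
                  exact hInv2.2 v hvbl (htg.tail hWEv)
              · exact hInv2.2 u hu
          · -- greys unchanged
            intro w
            rw [hcol3]
            split
            · next hweq =>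
              subst hweq
              constructor
              · intro h; cases h
              · intro h; rw [hw] at h; cases h
            · next hwne =>
              rw [hgr2 w, hcol1 w, if_neg hwne]
          · -- monotone
            intro w
            rw [hcol3]
            split
            · next hweq => subst hweq; rw [hw]; simp [rkS]
            · have h1 : rkS (colS s w) ≤ rkS (colS s1 w) := by
                rw [hcol1]
                split
                · next hweq => rw [hweq] at *; rw [hw]; simp [rkS]
                · exact le_refl _
              exact h1.trans (hmono2 w)
    · have hcond : (PySem.Dict.getD s node DFSSt.white ≠ DFSSt.white) := by
        simpa [colS] using hw
      rw [hasCycle, if_pos hcond]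
      have hgreyn : colS s node = DFSSt.grey := by
        cases hcol : colS s node
        · exact absurd hcol hw
        · rfl
        · exact absurd hcol hnb
      exact ⟨fun _ => ⟨node, hgrey node hgreyn⟩, fun hfalse => by cases hfalse⟩

theorem tl_spec (words : List String) : ∀ (ws : List String) (s : PySem.Dict String DFSSt),
    InvA words s → (∀ w, colS s w ≠ DFSSt.grey) → (∀ w ∈ ws, w ∈ words) →
    (topLoop (pvFirstLetters words) (words.length + 2) ws s = true →
      ∃ u, Relation.TransGen (WE words) u u) ∧
    (topLoop (pvFirstLetters words) (words.length + 2) ws s = false →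
      ∀ w ∈ ws, ¬ Relation.TransGen (WE words) w w) := by
  intro ws
  induction ws with
  | nil =>
    intro s _ _ _
    exact ⟨fun h => by simp [topLoop] at h, fun _ w hw => nomatch hw⟩
  | cons w rest ih =>
    intro s hInv hng hmem
    have hwcnt : wcnt words s ≤ words.length := by
      unfold wcnt
      calc (PySem.List.dedup words).countP _ ≤ (PySem.List.dedup words).length :=
            List.countP_le_length
        _ ≤ words.length := by
            rw [PySem.List.dedup_eq_ofList]; exact PySem.Set.length_ofList_le words
    by_cases hwh : colS s w = DFSSt.white
    · have hcond : PySem.Dict.getD s w DFSSt.white = DFSSt.white := hwh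
      rw [topLoop, if_pos hcond]
      have hhc := hc_spec words (words.length + 2) w s hInv
        (fun x hx => absurd hx (hng x)) (hmem w (List.mem_cons_self))
        (by omega) (by rw [hwh]; intro h; cases h)
      rcases hr : hasCycle (pvFirstLetters words) (words.length + 2) w s with ⟨b, s'⟩
      rw [hr] at hhc
      try rw [hr]
      cases b with
      | true => exact ⟨fun _ => hhc.1 rfl, fun hfalse => by simp at hfalse⟩
      | false =>
        rcases hhc.2 rfl with ⟨hwbl, hInv', hgr', hmono'⟩
        dsimp only at hwbl hInv' hgr' hmono' ⊢
        have hrest := ih s' hInv'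
          (fun x hx => hng x ((hgr' x).1 hx))
          (fun x hx => hmem x (List.mem_cons_of_mem _ hx))
        refine ⟨hrest.1, ?_⟩
        intro hfalse x hx
        rcases List.mem_cons.1 hx with rfl | hx'
        · exact hInv'.2 x hwbl
        · exact hrest.2 hfalse x hx'
    · have hcond : ¬ (PySem.Dict.getD s w DFSSt.white = DFSSt.white) := hwh
      rw [topLoop, if_neg hcond]
      have hwbl : colS s w = DFSSt.black := by
        cases hcol : colS s w
        · exact absurd hcol hwh
        · exact absurd hcol (hng w)
        · rfl
      have hrest := ih s hInv hng (fun x hx => hmem x (List.mem_cons_of_mem _ hx))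
      refine ⟨hrest.1, ?_⟩
      intro hfalse x hx
      rcases List.mem_cons.1 hx with rfl | hx'
      · exact hInv.2 x hwbl
      · exact hrest.2 hfalse x hx'

theorem colS_init (words : List String) (w : String) :
    colS (words.foldl (fun d w => PySem.Dict.insert d w DFSSt.white) PySem.Dict.empty) w
      = DFSSt.white := by
  have gen : ∀ (l : List String) (d : PySem.Dict String DFSSt),
      (∀ x, colS d x = DFSSt.white) →
      ∀ x, colS (l.foldl (fun d w => PySem.Dict.insert d w DFSSt.white) d) x = DFSSt.white := by
    intro l
    induction l with
    | nil => intro d h x; exact h x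
    | cons a t ih =>
      intro d h x
      rw [List.foldl_cons]
      apply ih
      intro y
      rw [colS_insert]
      split <;> [rfl; exact h y]
  exact gen words PySem.Dict.empty (fun x => by simp [colS, PySem.Dict.getD_empty]) w

theorem word_circle_eq_cycle (words : List String) :
    word_circle words = true ↔ ∃ u, Relation.TransGen (WE words) u u := by
  unfold word_circle
  have hInv0 : InvA words (words.foldl (fun d w => PySem.Dict.insert d w DFSSt.white) PySem.Dict.empty) := by
    constructor
    · intro u v hu _; rw [colS_init] at hu; cases hu
    · intro u hu; rw [colS_init] at hu; cases hu
  have htl := tl_spec words words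
    (words.foldl (fun d w => PySem.Dict.insert d w DFSSt.white) PySem.Dict.empty)
    hInv0 (fun w => by rw [colS_init]; intro h; cases h) (fun w hw => hw)
  constructor
  · exact htl.1
  · rintro ⟨u, hu⟩
    by_contra hne
    rw [Bool.not_eq_true] at hne
    have humem : u ∈ words := by
      rcases (Relation.TransGen.tail'_iff).1 hu with ⟨b, _, hWE⟩
      exact hWE.1
    exact htl.2 hne u humem hu

-- ===== VERDICT (by name: the statement is the Claim_ definition above) =====
theorem word_circle_spec : Claim_equal_word_circle := by
  intro words _ _
  unfold Spec_word_circle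
  rw [Bool.eq_iff_iff, word_circle_eq_cycle, word_circle_alt_eq_cycle, ← cycle_bridge]
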